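-- pv_equiv track=rewrite | github.com/sandialabs/pyNuMAD | src/pynumad/utils/misc_utils.py | full_keys_from_substrings
-- ===== SOURCE A (Python) =====
-- def full_keys_from_substrings(key_list, subtring_list,ignore_case=True):
--     """
--     Example Usage:
--     subString = ['B1N3TDx']
--     res=full_keys_from_substrings(df.keys(),subString)
--
--     output:
--     ['B1N3TDxr_[m]']
--
--     Example Usage:
--     subString = ['B2','TDx']
--     res=full_keys_from_substrings(df.keys(),subString)
--
--     output:
--     ['B2N1TDxr_[m]', 'B2N2TDxr_[m]', 'B2N3TDxr_[m]', 'B2N4TDxr_[m]', 'B2N5TDxr_[m]', 'B2N6TDxr_[m]', 'B2N7TDxr_[m]', 'B2N8TDxr_[m]', 'B2N9TDxr_[m]', 'B2TipTDxr_[m]']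
--
--
--     """
--     matched_keys = []
--     if ignore_case:
--
--         for key in key_list:
--             if all(substring.lower() in key.lower() for substring in subtring_list):
--                 matched_keys.append(key)
--     else:
--         for key in key_list:
--             if all(substring in key for substring in subtring_list):
--                 matched_keys.append(key)
--     return matched_keys
-- ===== SOURCE B (Python) =====
-- def full_keys_from_substrings(key_list, subtring_list, ignore_case=True):
--     # B: successive narrowing — filter the key list once per substring.
--     result = list(key_list)
--     for substring in subtring_list:
--         if ignore_case:
--             s = substring.lower()
--             result = [k for k in result if s in k.lower()]
--         else:
--             result = [k for k in result if substring in k]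
--     return result
-- ===== Notes on version B (the rewrite author's own statement) =====
-- stated objective: alternative
-- what changed: Replaced the single pass with an inner all() over substrings by m successive filtering passes that narrow a shrinking copy of the key list substring by substring.
import Mathlib
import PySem

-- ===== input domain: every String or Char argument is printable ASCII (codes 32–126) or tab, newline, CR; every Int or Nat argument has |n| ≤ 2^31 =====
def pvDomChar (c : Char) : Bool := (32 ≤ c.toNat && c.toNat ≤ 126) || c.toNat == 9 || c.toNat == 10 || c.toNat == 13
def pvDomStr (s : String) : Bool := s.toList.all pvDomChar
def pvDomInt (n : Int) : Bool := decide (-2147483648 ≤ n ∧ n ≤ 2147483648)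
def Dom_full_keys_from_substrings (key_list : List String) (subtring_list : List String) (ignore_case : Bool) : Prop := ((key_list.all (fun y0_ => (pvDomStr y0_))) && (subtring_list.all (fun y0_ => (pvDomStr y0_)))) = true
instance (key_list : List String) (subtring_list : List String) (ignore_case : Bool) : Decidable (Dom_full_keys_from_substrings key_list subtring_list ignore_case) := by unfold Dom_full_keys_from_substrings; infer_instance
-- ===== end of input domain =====

-- B replaces A's single pass with an inner all() by successive filtering passes, one per substring (alternative decomposition, same cost).

-- ===== PORT A =====
-- A: one pass over key_list, appending keys for which every substring is contained.
def full_keys_from_substrings (key_list : List String) (subtring_list : List String) (ignore_case : Bool) : List String :=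
  if ignore_case then
    key_list.foldl (fun matched_keys key =>
      if subtring_list.all (fun substring => PySem.Str.isIn (PySem.Str.lower substring) (PySem.Str.lower key)) then
        matched_keys ++ [key] else matched_keys) []
  else
    key_list.foldl (fun matched_keys key =>
      if subtring_list.all (fun substring => PySem.Str.isIn substring key) then
        matched_keys ++ [key] else matched_keys) []

-- ===== PORT B =====
-- B: successive narrowing — filter the key list once per substring.
def full_keys_from_substrings_alt (key_list : List String) (subtring_list : List String) (ignore_case : Bool) : List String :=
  subtring_list.foldl (fun result substring =>
    if ignore_case then
      result.filter (fun k => PySem.Str.isIn (PySem.Str.lower substring) (PySem.Str.lower k))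
    else
      result.filter (fun k => PySem.Str.isIn substring k)) key_list

-- ===== PRECONDITION & SPEC =====
def Spec_full_keys_from_substrings (key_list : List String) (subtring_list : List String) (ignore_case : Bool) (out : List String) : Prop := out = full_keys_from_substrings_alt key_list subtring_list ignore_case
instance (key_list : List String) (subtring_list : List String) (ignore_case : Bool) (out : List String) : Decidable (Spec_full_keys_from_substrings key_list subtring_list ignore_case out) := by unfold Spec_full_keys_from_substrings; infer_instance

-- ===== CLAIM (what is proved, stated in full; the proofs are below) =====
def Claim_equal_full_keys_from_substrings : Prop := ∀ (key_list : List String) (subtring_list : List String) (ignore_case : Bool), Dom_full_keys_from_substrings key_list subtring_list ignore_case → Spec_full_keys_from_substrings key_list subtring_list ignore_case (full_keys_from_substrings key_list subtring_list ignore_case)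

-- ===== LEMMAS AND PROOFS =====

-- ===== VERDICT (by name: the statement is the Claim_ definition above) =====
-- Iterated filtering over the substrings equals one filter by the conjunction of the tests.
theorem foldl_filter_eq_filter_all {α β : Type} (p : β → α → Bool) :
    ∀ (sl : List β) (l : List α),
      sl.foldl (fun res s => res.filter (p s)) l = l.filter (fun k => sl.all (fun s => p s k)) := by
  intro sl
  induction sl with
  | nil => intro l; simp
  | cons s rest ih =>
    intro l
    simp only [List.foldl_cons, ih, List.filter_filter, List.all_cons]
    exact List.filter_congr (fun k _ => by cases p s k <;> simp)

theorem full_keys_from_substrings_spec : Claim_equal_full_keys_from_substrings := by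
  intro key_list subtring_list ignore_case _
  unfold Spec_full_keys_from_substrings full_keys_from_substrings full_keys_from_substrings_alt
  cases ignore_case <;>
    simp only [if_true, if_false, Bool.false_eq_true, PySem.List.foldl_append_if_eq_filter,
      List.nil_append, foldl_filter_eq_filter_all]
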